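-- pv_equiv track=rewrite | github.com/ch1102chiou/CSE1309x_UsingPython | quiz3.py | my_fun7
-- ===== SOURCE A (Python) =====
-- def my_fun7(x):
--     count = 0
--     for str in x:
--         if str == "cat":
--             count = count + 1
--         elif str == "dog":
--             count = count - 1
--     return count
-- ===== SOURCE B (Python) =====
-- def my_fun7(x):
--     freq = {}
--     for s in x:
--         freq[s] = freq.get(s, 0) + 1
--     return freq.get("cat", 0) - freq.get("dog", 0)
-- ===== Notes on version B (the rewrite author's own statement) =====
-- stated objective: idiomatic
-- what changed: B builds a full frequency table of the list in one pass (a dict histogram) and finishes with two lookups, instead of A's per-element cat/dog conditional accumulation.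
import Mathlib
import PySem

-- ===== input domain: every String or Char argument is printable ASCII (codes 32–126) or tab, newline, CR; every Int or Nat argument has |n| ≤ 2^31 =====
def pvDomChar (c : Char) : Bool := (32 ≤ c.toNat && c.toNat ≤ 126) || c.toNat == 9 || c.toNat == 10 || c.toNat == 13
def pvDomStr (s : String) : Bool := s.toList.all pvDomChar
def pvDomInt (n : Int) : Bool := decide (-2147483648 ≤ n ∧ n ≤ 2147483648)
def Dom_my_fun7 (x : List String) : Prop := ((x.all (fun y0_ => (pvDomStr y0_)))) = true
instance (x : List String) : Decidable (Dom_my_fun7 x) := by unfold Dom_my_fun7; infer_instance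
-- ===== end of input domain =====

-- B builds a frequency table of the list in one pass and finishes with two lookups, instead of A's per-element cat/dog conditional accumulation (objective: idiomatic).


-- ===== PORT A =====
def my_fun7 (x : List String) : Int :=
  x.foldl (fun count s =>
    if s == "cat" then count + 1
    else if s == "dog" then count - 1
    else count) 0

-- ===== PORT B =====
def my_fun7_alt (x : List String) : Int :=
  let freq : PySem.Dict String Int :=
    x.foldl (fun d s => d.modify s 0 (· + 1)) PySem.Dict.empty
  freq.getD "cat" 0 - freq.getD "dog" 0

-- ===== PRECONDITION & SPEC =====
def Spec_my_fun7 (x : List String) (out : Int) : Prop := out = my_fun7_alt x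
instance (x : List String) (out : Int) : Decidable (Spec_my_fun7 x out) := by unfold Spec_my_fun7; infer_instance

-- ===== CLAIM (what is proved, stated in full; the proofs are below) =====
def Claim_equal_my_fun7 : Prop := ∀ (x : List String), Dom_my_fun7 x → Spec_my_fun7 x (my_fun7 x)

-- ===== LEMMAS AND PROOFS =====

-- ===== VERDICT (by name: the statement is the Claim_ definition above) =====
theorem my_fun7_A_count (x : List String) (c : Int) :
    x.foldl (fun count s =>
      if s == "cat" then count + 1
      else if s == "dog" then count - 1
      else count) c = c + (x.count "cat" : Int) - (x.count "dog" : Int) := by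
  induction x generalizing c with
  | nil => simp
  | cons h t ih =>
    simp only [List.foldl_cons, ih, List.count_cons]
    by_cases h1 : h = "cat" <;> by_cases h2 : h = "dog" <;>
      simp [h1, h2, beq_iff_eq] <;> omega

theorem my_fun7_spec : Claim_equal_my_fun7 := by
  intro x _
  unfold Spec_my_fun7 my_fun7 my_fun7_alt
  rw [← PySem.Dict.counter_eq_foldl]
  simp only [PySem.Dict.getD_counter]
  rw [my_fun7_A_count]
  ring
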